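-- pv_equiv track=rewrite | github.com/Amneet47/codewars-amneet47 | 7kyu/horse_stamina.py | estimator
-- ===== SOURCE A (Python) =====
-- def estimator(obstacles, stamina):
--     counts = {"1": 0, "1, 1": 0, "1, 1, 1": 0}
--     current_sequence = []
--
--     for num in obstacles:
--         if num == 1:
--             current_sequence.append(num)
--         else:
--             if current_sequence:  # Check if a sequence exists
--                 sequence_str = ", ".join(map(str, current_sequence))
--                 if sequence_str in counts:
--                     counts[sequence_str] += 1
--                 current_sequence = []  # Reset the sequence
--
--     # Check for a sequence at the end of the list
--     if current_sequence:
--         sequence_str = ", ".join(map(str, current_sequence))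
--         if sequence_str in counts:
--             counts[sequence_str] += 1
--
--     return_list = [counts["1"]*2, counts["1, 1"]*5, counts["1, 1, 1"]*10]
--     if sum(return_list) > stamina:
--         return False
--     else: return True
-- ===== SOURCE B (Python) =====
-- def estimator(obstacles, stamina):
--     # Window-counting reformulation: for k = 1..4 count the starts of maximal
--     # 1-runs of length >= k (independent passes), then combine linearly:
--     # a run of exact length L contributes 2,3,5,-10 at k = 1..4, which sums
--     # to 2 / 5 / 10 / 0 for L = 1 / 2 / 3 / >=4.
--     b = [x == 1 for x in obstacles]
--
--     def starts(k):
--         count, prev = 0, False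
--         for i, x in enumerate(b):
--             if not prev and i + k <= len(b) and all(b[i:i + k]):
--                 count += 1
--             prev = x
--         return count
--
--     total = 2 * starts(1) + 3 * starts(2) + 5 * starts(3) - 10 * starts(4)
--     return total <= stamina
-- ===== Notes on version B (the rewrite author's own statement) =====
-- stated objective: alternative
-- what changed: B drops A's stateful run accumulation with string-joined keys into a counter dict: it makes four independent window-counting passes (starts of maximal 1-runs of length >= k for k=1..4) and combines the counts by a linear formula 2*c1+3*c2+5*c3-10*c4 before comparing to stamina.
import Mathlib
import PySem

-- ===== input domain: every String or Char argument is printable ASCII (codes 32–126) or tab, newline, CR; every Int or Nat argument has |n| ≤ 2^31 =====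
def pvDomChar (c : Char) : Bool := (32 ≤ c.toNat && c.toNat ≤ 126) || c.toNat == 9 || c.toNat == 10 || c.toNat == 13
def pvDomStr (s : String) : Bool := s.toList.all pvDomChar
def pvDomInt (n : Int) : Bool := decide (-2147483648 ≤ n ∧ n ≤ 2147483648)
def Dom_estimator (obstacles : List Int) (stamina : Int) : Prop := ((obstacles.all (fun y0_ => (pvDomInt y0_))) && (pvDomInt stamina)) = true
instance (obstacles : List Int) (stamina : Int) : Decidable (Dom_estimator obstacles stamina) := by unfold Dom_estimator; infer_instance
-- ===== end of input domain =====

-- B replaces A's stateful run accumulation (string-joined run keys bumped in a counter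
-- dict) by four independent window-counting passes combined linearly (objective: alternative).

-- ===== PORT A =====
-- sequence_str = ", ".join(map(str, current_sequence))
def pvJoinA (cur : List Int) : String := PySem.Str.join ", " (cur.map PySem.Int.toStr)

-- "if sequence_str in counts: counts[sequence_str] += 1"
def pvBumpA (d : PySem.Dict String Int) (s : String) : PySem.Dict String Int :=
  if d.contains s then d.insert s (d.getD s 0 + 1) else d

-- the loop body, over state (counts, current_sequence)
def pvStepA (st : PySem.Dict String Int × List Int) (num : Int) :
    PySem.Dict String Int × List Int :=
  if num == 1 then (st.1, st.2 ++ [num])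
  else if st.2 ≠ [] then (pvBumpA st.1 (pvJoinA st.2), []) else st

def estimator (obstacles : List Int) (stamina : Int) : Bool :=
  let init : PySem.Dict String Int := PySem.Dict.ofList [("1", 0), ("1, 1", 0), ("1, 1, 1", 0)]
  let st := obstacles.foldl pvStepA (init, [])
  -- trailing-sequence check after the loop
  let counts := if st.2 ≠ [] then pvBumpA st.1 (pvJoinA st.2) else st.1
  let returnList : List Int :=
    [counts.getD "1" 0 * 2, counts.getD "1, 1" 0 * 5, counts.getD "1, 1, 1" 0 * 10]
  if returnList.sum > stamina then false else true

-- ===== PORT B =====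
-- def starts(k): count, prev = 0, False; for i, x in enumerate(b): …
def pvStartsB (b : List Bool) (k : Nat) : Int :=
  ((PySem.List.enumerate b 0).foldl
    (fun (st : Int × Bool) (p : Int × Bool) =>
      if !st.2 && decide (p.1 + (k : Int) ≤ (b.length : Int))
          && (PySem.List.slice b (some p.1) (some (p.1 + (k : Int)))).all id
      then (st.1 + 1, p.2) else (st.1, p.2))
    (0, false)).1

def estimator_alt (obstacles : List Int) (stamina : Int) : Bool :=
  let b := obstacles.map (fun x => x == 1)
  let total := 2 * pvStartsB b 1 + 3 * pvStartsB b 2 + 5 * pvStartsB b 3 - 10 * pvStartsB b 4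
  decide (total ≤ stamina)

-- ===== PRECONDITION & SPEC =====
def Spec_estimator (obstacles : List Int) (stamina : Int) (out : Bool) : Prop := out = estimator_alt obstacles stamina
instance (obstacles : List Int) (stamina : Int) (out : Bool) : Decidable (Spec_estimator obstacles stamina out) := by unfold Spec_estimator; infer_instance

-- ===== CLAIM (what is proved, stated in full; the proofs are below) =====
def Claim_equal_estimator : Prop := ∀ (obstacles : List Int) (stamina : Int), Dom_estimator obstacles stamina → Spec_estimator obstacles stamina (estimator obstacles stamina)

-- ===== LEMMAS AND PROOFS =====

-- {1: 2, 2: 5, 3: 10} length-to-cost table (proof-internal reference)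
def pvCostB : PySem.Dict Int Int := PySem.Dict.ofList [(1, 2), (2, 5), (3, 10)]

-- stateful run-length reference over Int obstacles, matching A's run structure
def pvStepB (st : Int × Int) (num : Int) : Int × Int :=
  if num == 1 then (st.1, st.2 + 1) else (st.1 + pvCostB.getD st.2 0, 0)

-- the same stateful reference over the booleans b = [x == 1 for x in obstacles]
def pvStepR (st : Int × Int) (x : Bool) : Int × Int :=
  if x then (st.1, st.2 + 1) else (st.1 + pvCostB.getD st.2 0, 0)

-- A's counts dict with the three counters as variables
def pvMkd (c1 c2 c3 : Int) : PySem.Dict String Int :=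
  PySem.Dict.mk [("1", c1), ("1, 1", c2), ("1, 1, 1", c3)]

-- the characters of ", ".join(["1"] * run)
def pvJ : Nat → List Char
  | 0 => []
  | 1 => ['1']
  | (n + 2) => '1' :: ',' :: ' ' :: pvJ (n + 1)

-- A's final weighted sum read off a counts dict
def pvW (d : PySem.Dict String Int) : Int :=
  d.getD "1" 0 * 2 + d.getD "1, 1" 0 * 5 + d.getD "1, 1, 1" 0 * 10

-- A's end-of-loop flush + weighted sum
def pvFinishA (st : PySem.Dict String Int × List Int) : Int :=
  pvW (if st.2 ≠ [] then pvBumpA st.1 (pvJoinA st.2) else st.1)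

-- stateful reference's end-of-loop total
def pvFinishB (st : Int × Int) : Int := st.1 + pvCostB.getD st.2 0

-- recursive characterization of B's starts(k) pass
def pvCnt (k : Nat) (prev : Bool) : List Bool → Nat
  | [] => 0
  | x :: xs =>
      (if !prev && decide (k ≤ (x :: xs).length) && ((x :: xs).take k).all id then 1 else 0)
        + pvCnt k x xs

-- B's linear combination of the four window counts
def pvWin (bs : List Bool) : Int :=
  2 * (pvCnt 1 false bs : Int) + 3 * (pvCnt 2 false bs : Int)
    + 5 * (pvCnt 3 false bs : Int) - 10 * (pvCnt 4 false bs : Int)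

lemma pvJ_rep (run : Nat) : (pvJoinA (List.replicate run 1)).toList = pvJ run := by
  induction run with
  | zero => decide
  | succ n ih =>
    match n, ih with
    | 0, _ => decide
    | (m + 1), ih =>
      have h : List.replicate (m + 2) (1 : Int) = 1 :: 1 :: List.replicate m 1 := rfl
      simp only [pvJoinA, h, List.map_cons, PySem.Str.toList_join, List.map_cons,
        PySem.Chars.join_cons_cons] at *
      simp only [pvJ]
      rw [← ih]
      rfl

lemma pvJ_len (run : Nat) (h : 1 ≤ run) : (pvJ run).length = 3 * run - 2 := by
  induction run with
  | zero => omega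
  | succ n ih =>
    match n, ih with
    | 0, _ => decide
    | (m + 1), ih =>
      have := ih (by omega)
      simp only [pvJ, List.length_cons] at *
      omega

lemma pvCost_other (r : Int) (h1 : r ≠ 1) (h2 : r ≠ 2) (h3 : r ≠ 3) : pvCostB.getD r 0 = 0 := by
  have h : pvCostB = PySem.Dict.mk [(1, 2), (2, 5), (3, 10)] := by decide
  have e1 : ((1 : Int) == r) = false := beq_eq_false_iff_ne.mpr (Ne.symm h1)
  have e2 : ((2 : Int) == r) = false := beq_eq_false_iff_ne.mpr (Ne.symm h2)
  have e3 : ((3 : Int) == r) = false := beq_eq_false_iff_ne.mpr (Ne.symm h3)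
  rw [h]
  simp [PySem.Dict.getD, PySem.Dict.get?, List.find?, e1, e2, e3]

lemma pvBump_big (c1 c2 c3 : Int) (run : Nat) (h : 4 ≤ run) :
    pvBumpA (pvMkd c1 c2 c3) (pvJoinA (List.replicate run 1)) = pvMkd c1 c2 c3 := by
  have hl : (pvJoinA (List.replicate run 1)).toList.length = 3 * run - 2 := by
    rw [pvJ_rep]; exact pvJ_len run (by omega)
  have hne : ∀ t : String, t.toList.length < 10 → (t == pvJoinA (List.replicate run 1)) = false := by
    intro t ht
    refine beq_eq_false_iff_ne.mpr (fun he => ?_)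
    rw [he] at ht; omega
  simp [pvBumpA, pvMkd, PySem.Dict.contains,
    hne "1" (by decide), hne "1, 1" (by decide), hne "1, 1, 1" (by decide)]

lemma pvFlushW (c1 c2 c3 : Int) (run : Nat) (h : 1 ≤ run) :
    ∃ d1 d2 d3 : Int,
      pvBumpA (pvMkd c1 c2 c3) (pvJoinA (List.replicate run 1)) = pvMkd d1 d2 d3 ∧
      2 * d1 + 5 * d2 + 10 * d3 = 2 * c1 + 5 * c2 + 10 * c3 + pvCostB.getD (run : Int) 0 := by
  match run with
  | 1 =>
    refine ⟨c1 + 1, c2, c3, ?_, ?_⟩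
    · have hj : pvJoinA (List.replicate 1 1) = "1" := by decide
      rw [hj]
      simp [pvBumpA, pvMkd, PySem.Dict.contains, PySem.Dict.insert, PySem.Dict.getD, PySem.Dict.get?]
    · have : pvCostB.getD ((1 : Nat) : Int) 0 = 2 := by decide
      rw [this]; ring
  | 2 =>
    refine ⟨c1, c2 + 1, c3, ?_, ?_⟩
    · have hj : pvJoinA (List.replicate 2 1) = "1, 1" := by decide
      rw [hj]
      simp [pvBumpA, pvMkd, PySem.Dict.contains, PySem.Dict.insert, PySem.Dict.getD, PySem.Dict.get?]
    · have : pvCostB.getD ((2 : Nat) : Int) 0 = 5 := by decide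
      rw [this]; ring
  | 3 =>
    refine ⟨c1, c2, c3 + 1, ?_, ?_⟩
    · have hj : pvJoinA (List.replicate 3 1) = "1, 1, 1" := by decide
      rw [hj]
      simp [pvBumpA, pvMkd, PySem.Dict.contains, PySem.Dict.insert, PySem.Dict.getD, PySem.Dict.get?]
    · have : pvCostB.getD ((3 : Nat) : Int) 0 = 10 := by decide
      rw [this]; ring
  | (n + 4) =>
    refine ⟨c1, c2, c3, pvBump_big c1 c2 c3 (n + 4) (by omega), ?_⟩
    have : pvCostB.getD (((n + 4 : Nat)) : Int) 0 = 0 := by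
      apply pvCost_other <;> (push_cast; omega)
    rw [this]; ring

lemma pvW_mkd (c1 c2 c3 : Int) : pvW (pvMkd c1 c2 c3) = 2 * c1 + 5 * c2 + 10 * c3 := by
  simp [pvW, pvMkd, PySem.Dict.getD, PySem.Dict.get?]; ring

lemma pvShiftB (xs : List Int) : ∀ (t c r : Int),
    pvFinishB (xs.foldl pvStepB (t + c, r)) = c + pvFinishB (xs.foldl pvStepB (t, r)) := by
  induction xs with
  | nil => intro t c r; simp [pvFinishB]; ring
  | cons x xs ih =>
    intro t c r
    by_cases hx : x = 1
    · simp [List.foldl_cons, pvStepB, hx]; exact ih t c (r + 1)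
    · have hb : (x == 1) = false := beq_eq_false_iff_ne.mpr hx
      simp only [List.foldl_cons, pvStepB, hb, Bool.false_eq_true, if_false]
      rw [show t + c + pvCostB.getD r 0 = (t + pvCostB.getD r 0) + c by ring]
      exact ih (t + pvCostB.getD r 0) c 0

lemma pvMain (xs : List Int) : ∀ (c1 c2 c3 t : Int) (run : Nat),
    pvFinishA (xs.foldl pvStepA (pvMkd c1 c2 c3, List.replicate run 1)) + t
      = (2 * c1 + 5 * c2 + 10 * c3) + pvFinishB (xs.foldl pvStepB (t, (run : Int))) := by
  induction xs with
  | nil =>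
    intro c1 c2 c3 t run
    simp only [List.foldl_nil, pvFinishA, pvFinishB]
    match run with
    | 0 => simp [pvW_mkd, show pvCostB.getD (0 : Int) 0 = 0 from by decide]
    | (m + 1) =>
      obtain ⟨d1, d2, d3, hd, hw⟩ := pvFlushW c1 c2 c3 (m + 1) (by omega)
      have hne : List.replicate (m + 1) (1 : Int) ≠ [] := by simp
      rw [if_pos hne, hd, pvW_mkd, hw]; ring
  | cons x xs ih =>
    intro c1 c2 c3 t run
    by_cases hx : x = 1
    · have h1 : pvStepA (pvMkd c1 c2 c3, List.replicate run 1) x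
          = (pvMkd c1 c2 c3, List.replicate (run + 1) 1) := by
        simp [pvStepA, hx, ← List.replicate_succ']
      have h2 : pvStepB (t, (run : Int)) x = (t, ((run + 1 : Nat) : Int)) := by
        simp [pvStepB, hx]
      rw [List.foldl_cons, List.foldl_cons, h1, h2]; exact ih c1 c2 c3 t (run + 1)
    · have hb : (x == 1) = false := beq_eq_false_iff_ne.mpr hx
      match run with
      | 0 =>
        have h1 : pvStepA (pvMkd c1 c2 c3, List.replicate 0 1) x
            = (pvMkd c1 c2 c3, List.replicate 0 1) := by simp [pvStepA, hb]
        have hc : pvCostB.getD ((0 : Nat) : Int) 0 = 0 := by decide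
        have h2 : pvStepB (t, ((0 : Nat) : Int)) x = (t, ((0 : Nat) : Int)) := by
          simp only [pvStepB, hb, Bool.false_eq_true, if_false]
          rw [hc]; norm_num
        rw [List.foldl_cons, List.foldl_cons, h1, h2]; exact ih c1 c2 c3 t 0
      | (m + 1) =>
        obtain ⟨d1, d2, d3, hd, hw⟩ := pvFlushW c1 c2 c3 (m + 1) (by omega)
        have hne : List.replicate (m + 1) (1 : Int) ≠ [] := by simp
        have h1 : pvStepA (pvMkd c1 c2 c3, List.replicate (m + 1) 1) x
            = (pvMkd d1 d2 d3, List.replicate 0 1) := by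
          simp only [pvStepA, hb, Bool.false_eq_true, if_false]
          rw [if_pos hne, hd]; rfl
        have h2 : pvStepB (t, ((m + 1 : Nat) : Int)) x
            = (t + pvCostB.getD ((m + 1 : Nat) : Int) 0, ((0 : Nat) : Int)) := by
          simp [pvStepB, hb]
        rw [List.foldl_cons, List.foldl_cons, h1, h2,
          pvShiftB xs t (pvCostB.getD ((m + 1 : Nat) : Int) 0) ((0 : Nat) : Int)]
        have := ih d1 d2 d3 t 0
        omega

-- pvStepB over the Int list is pvStepR over its boolean image
lemma pvFoldB_eq_foldR (xs : List Int) : ∀ st : Int × Int,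
    xs.foldl pvStepB st = (xs.map (fun x => x == 1)).foldl pvStepR st := by
  induction xs with
  | nil => intro st; rfl
  | cons x xs ih =>
    intro st
    simp only [List.foldl_cons, List.map_cons, pvStepB, pvStepR]
    exact ih _

-- bridge: B's enumerate/slice pass computes pvCnt
lemma pvStartsB_bridge (k : Nat) (b : List Bool) : ∀ (suf : List Bool) (j : Nat) (c : Int) (prev : Bool),
    b.drop j = suf →
    (((PySem.List.enumerate suf (j : Int)).foldl
      (fun (st : Int × Bool) (p : Int × Bool) =>
        if !st.2 && decide (p.1 + (k : Int) ≤ (b.length : Int))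
            && (PySem.List.slice b (some p.1) (some (p.1 + (k : Int)))).all id
        then (st.1 + 1, p.2) else (st.1, p.2))
      (c, prev)).1)
      = c + (pvCnt k prev suf : Int) := by
  intro suf
  induction suf with
  | nil => intro _ _ _ _; simp [PySem.List.enumerate_nil, pvCnt]
  | cons x rest ih =>
    intro j c prev h
    have hlen : b.length = j + (rest.length + 1) := by
      have := congrArg List.length h
      simp only [List.length_drop, List.length_cons] at this
      omega
    have hdrop : b.drop (j + 1) = rest := by
      have := congrArg List.tail h
      simpa [List.tail_drop] using this
    have hdec : decide ((j : Int) + (k : Int) ≤ (b.length : Int))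
        = decide (k ≤ (x :: rest).length) := by
      apply decide_eq_decide.mpr
      simp only [List.length_cons]
      push_cast [hlen]
      omega
    have hsl : PySem.List.slice b (some (j : Int)) (some ((j : Int) + (k : Int)))
        = (x :: rest).take k := by
      rw [PySem.List.slice_natCast_add b j k, h]
    rw [PySem.List.enumerate_cons, List.foldl_cons]
    simp only [hdec, hsl]
    have hcast : (j : Int) + 1 = ((j + 1 : Nat) : Int) := by push_cast; ring
    by_cases hC : (!prev && decide (k ≤ (x :: rest).length) && ((x :: rest).take k).all id) = true
    · rw [if_pos hC, hcast, ih (j + 1) (c + 1) x hdrop]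
      simp only [pvCnt, hC, if_pos]
      push_cast; ring
    · rw [if_neg hC, hcast, ih (j + 1) c x hdrop]
      simp only [pvCnt, if_neg hC]
      push_cast; ring

-- a window starting at a false contributes nothing
lemma pvTake_false (k : Nat) (hk : 1 ≤ k) (bs : List Bool) :
    ((false :: bs).take k).all id = false := by
  cases k with
  | zero => omega
  | succ m => simp [List.take_succ_cons]

lemma pvCnt_false_cons (k : Nat) (hk : 1 ≤ k) (bs : List Bool) :
    pvCnt k false (false :: bs) = pvCnt k false bs := by
  simp [pvCnt, pvTake_false k hk bs]

-- inside a run (prev = true) no starts are counted until the run ends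
lemma pvCnt_true_run (k : Nat) (hk : 1 ≤ k) (bs' : List Bool)
    (hb : bs' = [] ∨ ∃ bs2, bs' = false :: bs2) (m : Nat) :
    pvCnt k true (List.replicate m true ++ bs') = pvCnt k false bs' := by
  induction m with
  | zero =>
    simp only [List.replicate_zero, List.nil_append]
    rcases hb with h | ⟨bs2, h⟩
    · subst h; rfl
    · subst h
      simp [pvCnt, pvTake_false k hk bs2]
  | succ m ih =>
    simp only [List.replicate_succ, List.cons_append, pvCnt]
    simpa using ih

-- a maximal run of length m contributes one start for each k ≤ m
lemma pvCnt_run (k : Nat) (hk : 1 ≤ k) (m : Nat) (hm : 1 ≤ m) (bs' : List Bool)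
    (hb : bs' = [] ∨ ∃ bs2, bs' = false :: bs2) :
    pvCnt k false (List.replicate m true ++ bs')
      = (if k ≤ m then 1 else 0) + pvCnt k false bs' := by
  obtain ⟨m', rfl⟩ : ∃ m', m = m' + 1 := ⟨m - 1, by omega⟩
  have hlist : List.replicate (m' + 1) true ++ bs'
      = true :: (List.replicate m' true ++ bs') := by
    simp [List.replicate_succ]
  have hcond : (decide (k ≤ (List.replicate (m' + 1) true ++ bs').length)
      && ((List.replicate (m' + 1) true ++ bs').take k).all id) = decide (k ≤ m' + 1) := by
    by_cases hkm : k ≤ m' + 1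
    · have h1 : (List.replicate (m' + 1) true ++ bs').take k
          = List.take k (List.replicate (m' + 1) true) :=
        List.take_append_of_le_length (by simpa using hkm)
    
      have h2 : k ≤ (List.replicate (m' + 1) true ++ bs').length := by
        simp only [List.length_append, List.length_replicate]; omega
      simp [h1, hkm, List.take_replicate]
      omega
    · rcases hb with h | ⟨bs2, h⟩
      · subst h
        have : ¬ k ≤ (List.replicate (m' + 1) true ++ ([] : List Bool)).length := by
          simp only [List.append_nil, List.length_replicate]; omega
        simp [hkm]
      · subst h
        have h1 : (List.replicate (m' + 1) true ++ false :: bs2).take k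
            = List.replicate (m' + 1) true ++ (false :: bs2).take (k - (m' + 1)) := by
          rw [List.take_append, List.take_of_length_le (by simp; omega)]
          simp
        have h2 : (false :: bs2).take (k - (m' + 1)) = false :: bs2.take (k - (m' + 1) - 1) := by
          have : k - (m' + 1) = (k - (m' + 1) - 1) + 1 := by omega
          rw [this, List.take_succ_cons]
          simp
        simp [h1, h2, hkm]
  calc pvCnt k false (List.replicate (m' + 1) true ++ bs')
      = (if (decide (k ≤ (List.replicate (m' + 1) true ++ bs').length)
          && ((List.replicate (m' + 1) true ++ bs').take k).all id) = true then 1 else 0)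
        + pvCnt k true (List.replicate m' true ++ bs') := by
        rw [hlist]
        simp only [pvCnt, Bool.not_false, Bool.true_and, ← hlist]
    _ = (if k ≤ m' + 1 then 1 else 0) + pvCnt k false bs' := by
        rw [hcond, pvCnt_true_run k hk bs' hb m']
        simp

-- the linear combination of the four indicator contributions is the cost table
lemma pvCostSum (m : Nat) (hm : 1 ≤ m) :
    2 * ((if 1 ≤ m then (1 : Int) else 0)) + 3 * (if 2 ≤ m then (1 : Int) else 0)
      + 5 * (if 3 ≤ m then (1 : Int) else 0) - 10 * (if 4 ≤ m then (1 : Int) else 0)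
      = pvCostB.getD (m : Int) 0 := by
  match m with
  | 1 => norm_num; decide
  | 2 => norm_num; decide
  | 3 => norm_num; decide
  | (n + 4) =>
    have h0 : pvCostB.getD ((n + 4 : Nat) : Int) 0 = 0 := by
      apply pvCost_other <;> (push_cast; omega)
    rw [h0]
    have h1 : 1 ≤ n + 4 := by omega
    have h2 : 2 ≤ n + 4 := by omega
    have h3 : 3 ≤ n + 4 := by omega
    have h4 : 4 ≤ n + 4 := by omega
    rw [if_pos h1, if_pos h2, if_pos h3, if_pos h4]; ring

lemma pvFoldR_replicate (m : Nat) : ∀ (t r : Int),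
    (List.replicate m true).foldl pvStepR (t, r) = (t, r + m) := by
  induction m with
  | zero => intro t r; simp
  | succ m ih =>
    intro t r
    rw [List.replicate_succ, List.foldl_cons]
    simp only [pvStepR, if_true]
    rw [ih]
    push_cast; ring_nf

lemma pvShiftR (bs : List Bool) : ∀ (t c r : Int),
    pvFinishB (bs.foldl pvStepR (t + c, r)) = c + pvFinishB (bs.foldl pvStepR (t, r)) := by
  induction bs with
  | nil => intro t c r; simp [pvFinishB]; ring
  | cons x bs ih =>
    intro t c r
    cases x with
    | true => simp only [List.foldl_cons, pvStepR, if_true]; exact ih t c (r + 1)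
    | false =>
      simp only [List.foldl_cons, pvStepR, Bool.false_eq_true, if_false]
      rw [show t + c + pvCostB.getD r 0 = (t + pvCostB.getD r 0) + c by ring]
      exact ih (t + pvCostB.getD r 0) c 0

-- main equality: B's window combination equals the stateful reference total
lemma pvWin_eq_finR (n : Nat) : ∀ bs : List Bool, bs.length ≤ n →
    pvWin bs = pvFinishB (bs.foldl pvStepR (0, 0)) := by
  induction n with
  | zero =>
    intro bs h
    have : bs = [] := List.eq_nil_of_length_eq_zero (by omega)
    subst this; decide
  | succ n ih =>
    intro bs hlen
    match bs with
    | [] => decide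
    | false :: bs2 =>
      have e1 : pvWin (false :: bs2) = pvWin bs2 := by
        simp only [pvWin, pvCnt_false_cons 1 (by omega), pvCnt_false_cons 2 (by omega),
          pvCnt_false_cons 3 (by omega), pvCnt_false_cons 4 (by omega)]
      have e2 : (false :: bs2).foldl pvStepR (0, 0) = bs2.foldl pvStepR (0, 0) := by
        simp only [List.foldl_cons, pvStepR, Bool.false_eq_true, if_false]
        norm_num [show pvCostB.getD 0 0 = 0 from by decide]
      rw [e1, e2]
      exact ih bs2 (by simp only [List.length_cons] at hlen; omega)
    | true :: bs2 =>
      have hmem : ∀ x ∈ List.takeWhile id (true :: bs2), x = true := by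
        intro x hx
        have := List.mem_takeWhile_imp hx
        simpa using this
      have hrep : List.takeWhile id (true :: bs2)
          = List.replicate (List.takeWhile id (true :: bs2)).length true :=
        List.eq_replicate_of_mem hmem
      have hsplit : true :: bs2
          = List.replicate (List.takeWhile id (true :: bs2)).length true
            ++ List.dropWhile id (true :: bs2) := by
        conv_lhs => rw [← List.takeWhile_append_dropWhile (p := id) (l := true :: bs2)]
        rw [← hrep]
      have hm : 1 ≤ (List.takeWhile id (true :: bs2)).length := by
        rw [List.takeWhile_cons]
        simp
      have hb' : List.dropWhile id (true :: bs2) = []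
          ∨ ∃ bs3, List.dropWhile id (true :: bs2) = false :: bs3 := by
        cases hdw : List.dropWhile id (true :: bs2) with
        | nil => exact Or.inl rfl
        | cons y ys =>
          refine Or.inr ⟨ys, ?_⟩
          have h2 := List.head_dropWhile_not id (l := true :: bs2) (by simp [hdw])
          have h3 : (List.dropWhile id (true :: bs2)).head (by simp [hdw]) = y := by
            simp [hdw]
          rw [h3] at h2
          cases y
          · rfl
          · simp at h2
      set m := (List.takeWhile id (true :: bs2)).length with hmdef
      set dw := List.dropWhile id (true :: bs2) with hdwdef
      have hLHS : pvWin (true :: bs2)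
          = 2 * ((if 1 ≤ m then (1 : Int) else 0)) + 3 * (if 2 ≤ m then (1 : Int) else 0)
            + 5 * (if 3 ≤ m then (1 : Int) else 0) - 10 * (if 4 ≤ m then (1 : Int) else 0)
            + pvWin dw := by
        rw [hsplit]
        simp only [pvWin, pvCnt_run 1 (by omega) m hm dw hb', pvCnt_run 2 (by omega) m hm dw hb',
          pvCnt_run 3 (by omega) m hm dw hb', pvCnt_run 4 (by omega) m hm dw hb']
        push_cast [apply_ite (fun (x : Nat) => (x : Int))]
        ring
      rw [hLHS, pvCostSum m hm]
      have hfold : (true :: bs2).foldl pvStepR (0, 0)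
          = dw.foldl pvStepR (0, (m : Int)) := by
        conv_lhs => rw [hsplit]
        rw [List.foldl_append, pvFoldR_replicate m 0 0]
        norm_num
      rw [hfold]
      rcases hb' with hdw | ⟨bs3, hdw⟩
      · rw [hdw]
        simp only [List.foldl_nil, pvWin, pvCnt, pvFinishB]
        norm_num
      · have hlen3 : bs3.length ≤ n := by
          have := congrArg List.length hsplit
          simp only [List.length_cons, List.length_append, List.length_replicate, hdw] at this
          simp only [List.length_cons] at hlen this
          omega
        rw [hdw]
        simp only [List.foldl_cons, pvStepR, Bool.false_eq_true, if_false]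
        have e1 : pvWin (false :: bs3) = pvWin bs3 := by
          simp only [pvWin, pvCnt_false_cons 1 (by omega), pvCnt_false_cons 2 (by omega),
            pvCnt_false_cons 3 (by omega), pvCnt_false_cons 4 (by omega)]
        rw [e1]
        rw [pvShiftR bs3 0 (pvCostB.getD (m : Int) 0) 0, ih bs3 hlen3]

-- ===== VERDICT (by name: the statement is the Claim_ definition above) =====
theorem estimator_spec : Claim_equal_estimator := by
  intro obstacles stamina _
  unfold Spec_estimator
  have hinit : PySem.Dict.ofList [("1", (0 : Int)), ("1, 1", 0), ("1, 1, 1", 0)] = pvMkd 0 0 0 := by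
    decide
  have hmain := pvMain obstacles 0 0 0 0 0
  simp only [List.replicate, Nat.cast_zero, add_zero] at hmain
  have hB : ∀ k : Nat, pvStartsB (obstacles.map (fun x => x == 1)) k
      = (pvCnt k false (obstacles.map (fun x => x == 1)) : Int) := by
    intro k
    have h0 := pvStartsB_bridge k (obstacles.map (fun x => x == 1))
      (obstacles.map (fun x => x == 1)) 0 0 false (by simp)
    simpa [pvStartsB] using h0
  have hwin := pvWin_eq_finR (obstacles.map (fun x => x == 1)).length
    (obstacles.map (fun x => x == 1)) le_rfl
  have hfold := pvFoldB_eq_foldR obstacles ((0 : Int), (0 : Int))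
  have hBtot : (2 * pvStartsB (obstacles.map (fun x => x == 1)) 1
        + 3 * pvStartsB (obstacles.map (fun x => x == 1)) 2
        + 5 * pvStartsB (obstacles.map (fun x => x == 1)) 3
        - 10 * pvStartsB (obstacles.map (fun x => x == 1)) 4)
      = pvFinishB (obstacles.foldl pvStepB (0, 0)) := by
    rw [hB 1, hB 2, hB 3, hB 4, show (2 * (pvCnt 1 false (obstacles.map (fun x => x == 1)) : Int)
        + 3 * (pvCnt 2 false (obstacles.map (fun x => x == 1)) : Int)
        + 5 * (pvCnt 3 false (obstacles.map (fun x => x == 1)) : Int)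
        - 10 * (pvCnt 4 false (obstacles.map (fun x => x == 1)) : Int))
        = pvWin (obstacles.map (fun x => x == 1)) from rfl, hwin, ← hfold]
  simp only [estimator, estimator_alt, hinit, hBtot]
  have hsum : ∀ d : PySem.Dict String Int,
      [d.getD "1" 0 * 2, d.getD "1, 1" 0 * 5, d.getD "1, 1, 1" 0 * 10].sum = pvW d := by
    intro d; simp [pvW]; ring
  rw [hsum]
  have hA : pvW (if (obstacles.foldl pvStepA (pvMkd 0 0 0, [])).2 ≠ [] then
      pvBumpA (obstacles.foldl pvStepA (pvMkd 0 0 0, [])).1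
        (pvJoinA (obstacles.foldl pvStepA (pvMkd 0 0 0, [])).2)
      else (obstacles.foldl pvStepA (pvMkd 0 0 0, [])).1)
      = pvFinishA (obstacles.foldl pvStepA (pvMkd 0 0 0, [])) := rfl
  rw [hA, hmain]
  split_ifs with h
  · simp; omega
  · simp; omega
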